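-- pv_equiv track=rewrite | github.com/JohnJacobsonIII/AdventOfCode | tt/Day10/syntax_scoring.py | calculate_syntax_score
-- ===== SOURCE A (Python) =====
-- illegal_char_score_dict = {')': 3, ']': 57, '}': 1197, '>': 25137, '': 0}
--
-- autocomplete_char_score_dict = {')': 1, ']': 2, '}': 3, '>': 4}
--
-- def get_illegal_character(line):
--     stack = ''
--     for char in line:
--         if char == '(' or char == '[' or char == '{' or char == '<':
--             stack = stack + char
--         elif char == ')' and stack[-1] == '(':
--             stack = stack[:-1]
--         elif char == ']' and stack[-1] == '[':
--             stack = stack[:-1]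
--         elif char == '}' and stack[-1] == '{':
--             stack = stack[:-1]
--         elif char == '>' and stack[-1] == '<':
--             stack = stack[:-1]
--         else:
--             return char
--     return ''
--
-- def return_autocomplete_string(line):
--     stack = ''
--     for char in line:
--         if char == '(' or char == '[' or char == '{' or char == '<':
--             stack = stack + char
--         elif char == ')' and stack[-1] == '(':
--             stack = stack[:-1]
--         elif char == ']' and stack[-1] == '[':
--             stack = stack[:-1]
--         elif char == '}' and stack[-1] == '{':
--             stack = stack[:-1]
--         elif char == '>' and stack[-1] == '<':
--             stack = stack[:-1]
--         else:
--             return ''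
--     autocomplete_string = ''
--     for i in range(len(stack)-1, -1, -1):
--         if stack[i] == '(':
--             autocomplete_string = autocomplete_string + ')'
--         elif stack[i] == '[':
--             autocomplete_string = autocomplete_string + ']'
--         elif stack[i] == '{':
--             autocomplete_string = autocomplete_string + '}'
--         elif stack[i] == '<':
--             autocomplete_string = autocomplete_string + '>'
--     return autocomplete_string
--
-- def calculate_syntax_score(data, code):
--     score = 0
--     score_list = []
--
--     for line in data:
--         if code == 1:
--             score = score + illegal_char_score_dict[get_illegal_character(line)]
--         elif code == 2:
--             score = 0
--             for char in return_autocomplete_string(line):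
--                 score = score * 5 + autocomplete_char_score_dict[char]
--             if score != 0:
--                 score_list.append(score)
--
--     if code == 2:
--         score_list.sort()
--         score = score_list[int(len(score_list)/2)]
--
--     return score
-- ===== SOURCE B (Python) =====
-- _ILLEGAL = {')': 3, ']': 57, '}': 1197, '>': 25137, '': 0}
-- _OPENS = '([{<'
--
--
-- def _reduce(line):
--     """Rewrite the line to normal form by repeatedly deleting adjacent matched pairs."""
--     prev = None
--     while line != prev:
--         prev = line
--         for pair in ('()', '[]', '{}', '<>'):
--             line = line.replace(pair, '')
--     return line
--
--
-- def calculate_syntax_score(data, code):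
--     if code == 1:
--         total = 0
--         for line in data:
--             r = _reduce(line)
--             total += _ILLEGAL[next((c for c in r if c not in _OPENS), '')]
--         return total
--     if code == 2:
--         scores = []
--         for line in data:
--             r = _reduce(line)
--             if r and all(c in _OPENS for c in r):
--                 s = 0
--                 for c in reversed(r):
--                     s = s * 5 + _OPENS.index(c) + 1
--                 scores.append(s)
--         scores.sort()
--         return scores[len(scores) // 2]
--     return 0
-- ===== Notes on version B (the rewrite author's own statement) =====
-- stated objective: alternative
-- what changed: B abandons A's explicit stack scan entirely: it rewrites each line to a normal form by repeatedly deleting adjacent matched bracket pairs with str.replace until a fixpoint, then reads the syntax-error char as the first non-open char of the normal form and the autocomplete score directly off the reversed normal form (which is exactly the leftover opens), never simulating a stack or building the completion string.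
import Mathlib
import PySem

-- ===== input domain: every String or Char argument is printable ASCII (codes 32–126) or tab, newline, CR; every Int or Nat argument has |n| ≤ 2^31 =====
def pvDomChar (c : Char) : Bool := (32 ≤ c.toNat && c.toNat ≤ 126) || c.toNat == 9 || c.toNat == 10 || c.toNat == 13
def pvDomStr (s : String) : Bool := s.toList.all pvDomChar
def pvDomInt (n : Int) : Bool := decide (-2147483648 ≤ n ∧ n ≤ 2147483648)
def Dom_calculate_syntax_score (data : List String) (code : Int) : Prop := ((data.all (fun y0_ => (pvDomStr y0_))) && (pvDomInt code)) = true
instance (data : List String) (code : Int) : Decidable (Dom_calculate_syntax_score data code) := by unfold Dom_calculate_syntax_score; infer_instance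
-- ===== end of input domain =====

-- B drops A's explicit stack scan: it rewrites each line to a normal form by repeatedly deleting
-- adjacent matched bracket pairs (str.replace to a fixpoint); the syntax-error char is the first
-- non-open char of the normal form and the autocomplete score is read off the reversed normal
-- form directly (objective: alternative algorithm, same cost class).
-- Python stacks grow/shrink at the END of a string; port A represents the stack with the TOP at
-- the HEAD of a List Char (exact: push = cons, stack[-1] = head, stack[:-1] = tail, and Python's
-- end-to-start iteration over the stack = head-first iteration here).

-- ===== PORT A =====
-- dicts keyed by the (length ≤ 1) strings Python uses, as lists of chars
def pvIllegalDictA : PySem.Dict (List Char) Int :=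
  PySem.Dict.mk [([')'], 3), ([']'], 57), (['}'], 1197), (['>'], 25137), ([], 0)]
def pvAutoDictA : PySem.Dict (List Char) Int :=
  PySem.Dict.mk [([')'], 1), ([']'], 2), (['}'], 3), (['>'], 4)]

-- get_illegal_character: some cs = the returned string's chars; none = IndexError (stack[-1] on '')
def pvGetIllegal (stack : List Char) : List Char → Option (List Char)
  | [] => some []
  | c :: rest =>
    if c = '(' ∨ c = '[' ∨ c = '{' ∨ c = '<' then pvGetIllegal (c :: stack) rest
    else if c = ')' then
      match stack with
      | [] => none
      | t :: s => if t = '(' then pvGetIllegal s rest else some [c]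
    else if c = ']' then
      match stack with
      | [] => none
      | t :: s => if t = '[' then pvGetIllegal s rest else some [c]
    else if c = '}' then
      match stack with
      | [] => none
      | t :: s => if t = '{' then pvGetIllegal s rest else some [c]
    else if c = '>' then
      match stack with
      | [] => none
      | t :: s => if t = '<' then pvGetIllegal s rest else some [c]
    else some [c]

-- the second loop of return_autocomplete_string (stack iterated end-to-start = head-first here)
def pvBuildAuto (stack : List Char) : List Char :=
  stack.foldl (fun acc ch =>
    if ch = '(' then acc ++ [')']
    else if ch = '[' then acc ++ [']']
    else if ch = '{' then acc ++ ['}']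
    else if ch = '<' then acc ++ ['>'] else acc) []

-- return_autocomplete_string: none = IndexError
def pvAutoComplete (stack : List Char) : List Char → Option (List Char)
  | [] => some (pvBuildAuto stack)
  | c :: rest =>
    if c = '(' ∨ c = '[' ∨ c = '{' ∨ c = '<' then pvAutoComplete (c :: stack) rest
    else if c = ')' then
      match stack with
      | [] => none
      | t :: s => if t = '(' then pvAutoComplete s rest else some []
    else if c = ']' then
      match stack with
      | [] => none
      | t :: s => if t = '[' then pvAutoComplete s rest else some []
    else if c = '}' then
      match stack with
      | [] => none
      | t :: s => if t = '{' then pvAutoComplete s rest else some []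
    else if c = '>' then
      match stack with
      | [] => none
      | t :: s => if t = '<' then pvAutoComplete s rest else some []
    else some []

def calculate_syntax_score (data : List String) (code : Int) : Int :=
  let st := data.foldl (fun (acc : Int × List Int) line =>
    if code = 1 then
      -- .getD [] / .getD 0: the IndexError/KeyError inputs are excluded by Pre_
      (acc.1 + (PySem.Dict.get? pvIllegalDictA ((pvGetIllegal [] line.toList).getD [])).getD 0, acc.2)
    else if code = 2 then
      -- .getD []: the IndexError inputs are excluded by Pre_
      let auto := (pvAutoComplete [] line.toList).getD []
      let score := auto.foldl (fun s ch => s * 5 + (PySem.Dict.get? pvAutoDictA [ch]).getD 0) 0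
      if score ≠ 0 then (score, acc.2 ++ [score]) else (score, acc.2)
    else acc) (0, [])
  if code = 2 then
    let sorted := PySem.List.sorted st.2 (fun x => x) false
    -- score_list[int(len(score_list)/2)]; .getD 0: the empty-list IndexError is excluded by Pre_
    (PySem.List.pyGet? sorted (PySem.Int.truncdiv (sorted.length : Int) 2)).getD 0
  else st.1

-- ===== PORT B =====
def pvOpensB : List Char := ['(', '[', '{', '<']
def pvIllegalDictB : PySem.Dict (List Char) Int :=
  PySem.Dict.mk [([')'], 3), ([']'], 57), (['}'], 1197), (['>'], 25137), ([], 0)]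

-- one sweep of the for-loop body: line.replace('()','').replace... (the four pairs in order)
def pvReduceStep (l : List Char) : List Char :=
  PySem.Chars.replace (PySem.Chars.replace (PySem.Chars.replace
    (PySem.Chars.replace l ['(', ')'] []) ['[', ']'] []) ['{', '}'] []) ['<', '>'] []

-- the while loop of _reduce; fuel only totalizes it: every productive iteration shortens the
-- string by ≥ 2 chars, so length+1 iterations always reach the fixpoint the Python loop reaches
def pvReduceGo : Nat → List Char → List Char
  | 0, l => l
  | n + 1, l => let l' := pvReduceStep l; if l' = l then l else pvReduceGo n l'

def pvReduce (l : List Char) : List Char := pvReduceGo (l.length + 1) l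

-- next((c for c in r if c not in _OPENS), '')  — the result string's chars ([] = '')
def pvFirstNonOpen : List Char → Option Char
  | [] => none
  | c :: t => if PySem.Chars.isIn [c] pvOpensB then pvFirstNonOpen t else some c

def calculate_syntax_score_alt (data : List String) (code : Int) : Int :=
  if code = 1 then
    data.foldl (fun total line =>
      let r := pvReduce line.toList
      -- KeyError on a stray non-bracket char is excluded by Pre_
      total + (PySem.Dict.get? pvIllegalDictB
        (match pvFirstNonOpen r with | some c => [c] | none => [])).getD 0) 0
  else if code = 2 then
    let scores := data.foldl (fun (acc : List Int) line =>
      let r := pvReduce line.toList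
      if r ≠ [] ∧ r.all (fun c => PySem.Chars.isIn [c] pvOpensB) then
        acc ++ [r.reverse.foldl (fun s c => s * 5 + (PySem.Chars.find pvOpensB [c] + 1)) 0]
      else acc) []
    let sorted := PySem.List.sorted scores (fun x => x) false
    -- scores[len(scores) // 2]; .getD 0: the empty-list IndexError is excluded by Pre_
    (PySem.List.pyGet? sorted (PySem.Int.floordiv (sorted.length : Int) 2)).getD 0
  else 0

-- ===== PRECONDITION & SPEC =====
-- The bracket status of one line, as a spec-level classifier (top of stack at the head; distinct
-- from both ports' computations). A bracket-matching domain condition cannot be stated without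
-- scanning the line; this is the standard single-pass characterisation a reader checks by hand.
inductive PvLineStatus where
  | ok : List Char → PvLineStatus   -- line consumed; leftover open brackets (top first; [] = complete)
  | bad : Char → PvLineStatus       -- first offending char (mismatched closer or stray char)
  | err : PvLineStatus              -- a closer met an empty stack (A raises IndexError there)
deriving DecidableEq, Repr

def pvStatus (stack : List Char) : List Char → PvLineStatus
  | [] => .ok stack
  | c :: cs =>
    if c = '(' ∨ c = '[' ∨ c = '{' ∨ c = '<' then pvStatus (c :: stack) cs
    else if c = ')' ∨ c = ']' ∨ c = '}' ∨ c = '>' then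
      match stack with
      | [] => .err
      | t :: s =>
        if (t = '(' ∧ c = ')') ∨ (t = '[' ∧ c = ']') ∨ (t = '{' ∧ c = '}') ∨ (t = '<' ∧ c = '>')
        then pvStatus s cs else .bad c
    else .bad c

def pvSafe1 : PvLineStatus → Bool
  | .ok _ => true
  | .bad c => c = ')' ∨ c = ']' ∨ c = '}' ∨ c = '>'
  | .err => false

def pvIncomplete : PvLineStatus → Bool
  | .ok (_ :: _) => true
  | _ => false

-- Pre_ excludes exactly the inputs on which Python A raises: for code 1, a line whose first
-- offending char is a closer on an empty stack (IndexError) or a stray non-bracket char (KeyError);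
-- for code 2, a closer on an empty stack (IndexError) or no incomplete line at all (IndexError on
-- score_list[...] of an empty list).
def Pre_calculate_syntax_score (data : List String) (code : Int) : Prop :=
  (code = 1 → ∀ line ∈ data, pvSafe1 (pvStatus [] line.toList) = true) ∧
  (code = 2 → (∀ line ∈ data, pvStatus [] line.toList ≠ .err) ∧
              data.any (fun line => pvIncomplete (pvStatus [] line.toList)) = true)
instance (data : List String) (code : Int) : Decidable (Pre_calculate_syntax_score data code) := by
  unfold Pre_calculate_syntax_score; infer_instance

def pvWitness_calculate_syntax_score : List String × Int := (["<>()", "(]", "([{"], 1)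

def Spec_calculate_syntax_score (data : List String) (code : Int) (out : Int) : Prop := out = calculate_syntax_score_alt data code
instance (data : List String) (code : Int) (out : Int) : Decidable (Spec_calculate_syntax_score data code out) := by unfold Spec_calculate_syntax_score; infer_instance

-- ===== CLAIM (what is proved, stated in full; the proofs are below) =====
def Claim_equal_calculate_syntax_score : Prop := ∀ (data : List String) (code : Int), Dom_calculate_syntax_score data code → Pre_calculate_syntax_score data code → Spec_calculate_syntax_score data code (calculate_syntax_score data code)

-- ===== LEMMAS AND PROOFS =====

-- proof-level machinery: the one-step normal-form builder (delete-on-match) relating B's fixpoint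
-- rewriting to A's scan; neither port computes with it
def pvDelPair (o c : Char) : List Char → List Char
  | [] => []
  | [x] => [x]
  | x :: y :: t => if x = o ∧ y = c then pvDelPair o c t else x :: pvDelPair o c (y :: t)

theorem pvReplaceGo_eq (o c : Char) : ∀ (fuel : Nat) (l acc : List Char), l.length ≤ fuel →
    PySem.Chars.replace.go [o, c] [] fuel l acc = acc.reverse ++ pvDelPair o c l := by
  intro fuel
  induction fuel with
  | zero =>
    intro l acc h
    have : l = [] := List.length_eq_zero_iff.mp (Nat.le_zero.mp h)
    subst this
    simp [PySem.Chars.replace.go, pvDelPair]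
  | succ n ih =>
    intro l acc h
    match l with
    | [] => simp [PySem.Chars.replace.go, pvDelPair]
    | [x] =>
      have hpref : [o, c].isPrefixOf [x] = false := by
        simp [List.isPrefixOf]
      simp only [PySem.Chars.replace.go, hpref]
      rw [ih [] (x :: acc) (by simp)]
      simp [pvDelPair]
    | x :: y :: t =>
      by_cases hm : x = o ∧ y = c
      · obtain ⟨rfl, rfl⟩ := hm
        have hpref : [x, y].isPrefixOf (x :: y :: t) = true := by
          simp [List.isPrefixOf]
        simp only [PySem.Chars.replace.go, hpref]
        rw [show List.drop [x,y].length (x :: y :: t) = t from rfl]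
        rw [ih t (List.reverse [] ++ acc) (by simp at h ⊢; omega)]
        simp [pvDelPair]
      · have hpref : [o, c].isPrefixOf (x :: y :: t) = false := by
          simp [List.isPrefixOf]
          intro h1 h2; exact hm ⟨h1.symm, h2.symm⟩
        simp only [PySem.Chars.replace.go, hpref]
        rw [ih (y :: t) (x :: acc) (by simp at h ⊢; omega)]
        simp [pvDelPair, hm]

theorem pvReplace_eq (o c : Char) (l : List Char) :
    PySem.Chars.replace l [o, c] [] = pvDelPair o c l := by
  rw [PySem.Chars.replace]
  simp only [List.isEmpty_cons, ite_false, Bool.false_eq_true]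
  rw [pvReplaceGo_eq o c l.length l [] (le_refl _)]
  simp

def pvPairOf (c : Char) : Option Char :=
  if c = '(' then some ')' else if c = '[' then some ']'
  else if c = '{' then some '}' else if c = '<' then some '>' else none

def pvIsOpen (c : Char) : Bool := c = '(' ∨ c = '[' ∨ c = '{' ∨ c = '<'

def pvCanonStep (out : List Char) (ch : Char) : List Char :=
  match out with
  | [] => [ch]
  | top :: rest => if pvPairOf top = some ch then rest else ch :: out

theorem pvPairOf_ne_open (o t : Char) (ho : pvIsOpen o = true) : pvPairOf t ≠ some o := by
  intro h
  simp only [pvIsOpen, decide_eq_true_eq] at ho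
  unfold pvPairOf at h
  split_ifs at h <;>
    first
      | exact Option.noConfusion h
      | (injection h with h; rcases ho with rfl|rfl|rfl|rfl <;> exact absurd h (by decide))

theorem pvCanonStep_push (out : List Char) (ch : Char) (h : pvIsOpen ch = true) :
    pvCanonStep out ch = ch :: out := by
  match out with
  | [] => rfl
  | top :: rest => simp [pvCanonStep, pvPairOf_ne_open ch top h]

theorem pvDel_canon (o c : Char) (ho : pvIsOpen o = true) (hc : pvPairOf o = some c) :
    ∀ (n : Nat) (l : List Char), l.length ≤ n → ∀ out : List Char,
      (pvDelPair o c l).foldl pvCanonStep out = l.foldl pvCanonStep out := by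
  intro n
  induction n with
  | zero =>
    intro l h out
    have : l = [] := List.length_eq_zero_iff.mp (Nat.le_zero.mp h)
    subst this; rfl
  | succ n ih =>
    intro l h out
    match l with
    | [] => rfl
    | [x] => rfl
    | x :: y :: t =>
      by_cases hm : x = o ∧ y = c
      · obtain ⟨rfl, rfl⟩ := hm
        simp only [pvDelPair, and_self, if_true]
        rw [ih t (by simp at h ⊢; omega) out]
        simp only [List.foldl_cons]
        rw [pvCanonStep_push out x ho]
        simp [pvCanonStep, hc]
      · simp only [pvDelPair, if_neg hm, List.foldl_cons]
        exact ih (y :: t) (by simp at h ⊢; omega) (pvCanonStep out x)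

def pvNoAdj : List Char → Prop
  | x :: y :: t => pvPairOf x ≠ some y ∧ pvNoAdj (y :: t)
  | _ => True

def pvNoAdjP (o c : Char) : List Char → Prop
  | x :: y :: t => ¬(x = o ∧ y = c) ∧ pvNoAdjP o c (y :: t)
  | _ => True

theorem pvDelPair_length_le (o c : Char) : ∀ (n : Nat) (l : List Char), l.length ≤ n →
    (pvDelPair o c l).length ≤ l.length := by
  intro n
  induction n with
  | zero =>
    intro l h
    have : l = [] := List.length_eq_zero_iff.mp (Nat.le_zero.mp h)
    subst this; simp [pvDelPair]
  | succ n ih =>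
    intro l h
    match l with
    | [] => simp [pvDelPair]
    | [x] => simp [pvDelPair]
    | x :: y :: t =>
      by_cases hm : x = o ∧ y = c
      · simp only [pvDelPair, if_pos hm]
        have := ih t (by simp at h ⊢; omega)
        simp at this ⊢; omega
      · simp only [pvDelPair, if_neg hm]
        have := ih (y :: t) (by simp at h ⊢; omega)
        simp at this ⊢; omega

theorem pvDelPair_length_lt (o c : Char) : ∀ (n : Nat) (l : List Char), l.length ≤ n →
    pvDelPair o c l ≠ l → (pvDelPair o c l).length < l.length := by
  intro n
  induction n with
  | zero =>
    intro l h hne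
    have : l = [] := List.length_eq_zero_iff.mp (Nat.le_zero.mp h)
    subst this; simp [pvDelPair] at hne
  | succ n ih =>
    intro l h hne
    match l with
    | [] => simp [pvDelPair] at hne
    | [x] => simp [pvDelPair] at hne
    | x :: y :: t =>
      by_cases hm : x = o ∧ y = c
      · simp only [pvDelPair, if_pos hm]
        have := pvDelPair_length_le o c n t (by simp at h ⊢; omega)
        simp at this ⊢; omega
      · simp only [pvDelPair, if_neg hm] at hne ⊢
        have hne' : pvDelPair o c (y :: t) ≠ y :: t := by
          intro hx; exact hne (by rw [hx])
        have := ih (y :: t) (by simp at h ⊢; omega) hne'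
        simp at this ⊢; omega

theorem pvDelPair_fix_noAdjP (o c : Char) : ∀ (n : Nat) (l : List Char), l.length ≤ n →
    pvDelPair o c l = l → pvNoAdjP o c l := by
  intro n
  induction n with
  | zero =>
    intro l h _
    have : l = [] := List.length_eq_zero_iff.mp (Nat.le_zero.mp h)
    subst this; trivial
  | succ n ih =>
    intro l h heq
    match l with
    | [] => trivial
    | [x] => trivial
    | x :: y :: t =>
      by_cases hm : x = o ∧ y = c
      · exfalso
        simp only [pvDelPair, if_pos hm] at heq
        have := pvDelPair_length_le o c n t (by simp at h ⊢; omega)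
        have := congrArg List.length heq
        simp at this; omega
      · simp only [pvDelPair, if_neg hm, List.cons.injEq, true_and] at heq
        exact ⟨hm, ih (y :: t) (by simp at h ⊢; omega) heq⟩

theorem pvNoAdj_of_four (l : List Char)
    (h1 : pvNoAdjP '(' ')' l) (h2 : pvNoAdjP '[' ']' l)
    (h3 : pvNoAdjP '{' '}' l) (h4 : pvNoAdjP '<' '>' l) : pvNoAdj l := by
  induction l with
  | nil => trivial
  | cons x t ih =>
    match t with
    | [] => trivial
    | y :: t' =>
      obtain ⟨p1, q1⟩ := h1
      obtain ⟨p2, q2⟩ := h2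
      obtain ⟨p3, q3⟩ := h3
      obtain ⟨p4, q4⟩ := h4
      refine ⟨?_, ih q1 q2 q3 q4⟩
      intro h
      unfold pvPairOf at h
      split_ifs at h with a b c' d
      · injection h with h; exact p1 ⟨a, h.symm⟩
      · injection h with h; exact p2 ⟨b, h.symm⟩
      · injection h with h; exact p3 ⟨c', h.symm⟩
      · injection h with h; exact p4 ⟨d, h.symm⟩

def pvBound (out l : List Char) : Prop :=
  match out, l with | top :: _, ch :: _ => pvPairOf top ≠ some ch | _, _ => True

theorem pvNoAdj_foldl : ∀ (l out : List Char), pvNoAdj l → pvBound out l →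
    l.foldl pvCanonStep out = l.reverse ++ out := by
  intro l
  induction l with
  | nil => intro out _ _; simp
  | cons ch t ih =>
    intro out hna hb
    have hstep : pvCanonStep out ch = ch :: out := by
      cases out with
      | nil => rfl
      | cons top rest =>
        have hb0 : pvPairOf top ≠ some ch := hb
        simp only [pvCanonStep, if_neg hb0]
    simp only [List.foldl_cons, hstep]
    have hna' : pvNoAdj t := by
      match t with
      | [] => trivial
      | y :: t' => exact hna.2
    have hb' : pvBound (ch :: out) t := by
      match t with
      | [] => trivial
      | y :: t' => exact hna.1
    rw [ih (ch :: out) hna' hb']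
    simp

theorem pvReduceStep_eq (l : List Char) :
    pvReduceStep l = pvDelPair '<' '>' (pvDelPair '{' '}' (pvDelPair '[' ']' (pvDelPair '(' ')' l))) := by
  simp [pvReduceStep, pvReplace_eq]

theorem pvReduceStep_canon (l : List Char) (out : List Char) :
    (pvReduceStep l).foldl pvCanonStep out = l.foldl pvCanonStep out := by
  rw [pvReduceStep_eq]
  rw [pvDel_canon '<' '>' (by decide) (by decide) _ _ (le_refl _) out]
  rw [pvDel_canon '{' '}' (by decide) (by decide) _ _ (le_refl _) out]
  rw [pvDel_canon '[' ']' (by decide) (by decide) _ _ (le_refl _) out]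
  rw [pvDel_canon '(' ')' (by decide) (by decide) _ _ (le_refl _) out]

theorem pvFourNe (a : List Char)
    (h : pvDelPair '<' '>' (pvDelPair '{' '}' (pvDelPair '[' ']' (pvDelPair '(' ')' a))) ≠ a) :
    (pvDelPair '<' '>' (pvDelPair '{' '}' (pvDelPair '[' ']' (pvDelPair '(' ')' a)))).length < a.length := by
  by_cases e1 : pvDelPair '(' ')' a = a
  · rw [e1] at h ⊢
    by_cases e2 : pvDelPair '[' ']' a = a
    · rw [e2] at h ⊢
      by_cases e3 : pvDelPair '{' '}' a = a
      · rw [e3] at h ⊢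
        exact pvDelPair_length_lt '<' '>' _ a (le_refl _) h
      · have hlt := pvDelPair_length_lt '{' '}' _ a (le_refl _) e3
        have hle := pvDelPair_length_le '<' '>' _ (pvDelPair '{' '}' a) (le_refl _)
        omega
    · have hlt := pvDelPair_length_lt '[' ']' _ a (le_refl _) e2
      have hle1 := pvDelPair_length_le '{' '}' _ (pvDelPair '[' ']' a) (le_refl _)
      have hle2 := pvDelPair_length_le '<' '>' _ (pvDelPair '{' '}' (pvDelPair '[' ']' a)) (le_refl _)
      omega
  · have hlt := pvDelPair_length_lt '(' ')' _ a (le_refl _) e1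
    have hle1 := pvDelPair_length_le '[' ']' _ (pvDelPair '(' ')' a) (le_refl _)
    have hle2 := pvDelPair_length_le '{' '}' _ (pvDelPair '[' ']' (pvDelPair '(' ')' a)) (le_refl _)
    have hle3 := pvDelPair_length_le '<' '>' _ (pvDelPair '{' '}' (pvDelPair '[' ']' (pvDelPair '(' ')' a))) (le_refl _)
    omega

theorem pvReduceStep_length_lt (l : List Char) (h : pvReduceStep l ≠ l) :
    (pvReduceStep l).length < l.length := by
  rw [pvReduceStep_eq] at h ⊢
  exact pvFourNe l h

theorem pvFourFix (a : List Char)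
    (h : pvDelPair '<' '>' (pvDelPair '{' '}' (pvDelPair '[' ']' (pvDelPair '(' ')' a))) = a) :
    pvDelPair '(' ')' a = a ∧ pvDelPair '[' ']' a = a ∧ pvDelPair '{' '}' a = a ∧
    pvDelPair '<' '>' a = a := by
  by_cases e1 : pvDelPair '(' ')' a = a
  · rw [e1] at h
    by_cases e2 : pvDelPair '[' ']' a = a
    · rw [e2] at h
      by_cases e3 : pvDelPair '{' '}' a = a
      · rw [e3] at h; exact ⟨e1, e2, e3, h⟩
      · exfalso
        have hlt := pvDelPair_length_lt '{' '}' _ a (le_refl _) e3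
        have hle := pvDelPair_length_le '<' '>' _ (pvDelPair '{' '}' a) (le_refl _)
        have hlen := congrArg List.length h
        omega
    · exfalso
      have hlt := pvDelPair_length_lt '[' ']' _ a (le_refl _) e2
      have hle1 := pvDelPair_length_le '{' '}' _ (pvDelPair '[' ']' a) (le_refl _)
      have hle2 := pvDelPair_length_le '<' '>' _ (pvDelPair '{' '}' (pvDelPair '[' ']' a)) (le_refl _)
      have hlen := congrArg List.length h
      omega
  · exfalso
    have hlt := pvDelPair_length_lt '(' ')' _ a (le_refl _) e1
    have hle1 := pvDelPair_length_le '[' ']' _ (pvDelPair '(' ')' a) (le_refl _)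
    have hle2 := pvDelPair_length_le '{' '}' _ (pvDelPair '[' ']' (pvDelPair '(' ')' a)) (le_refl _)
    have hle3 := pvDelPair_length_le '<' '>' _ (pvDelPair '{' '}' (pvDelPair '[' ']' (pvDelPair '(' ')' a))) (le_refl _)
    have hlen := congrArg List.length h
    omega

theorem pvReduceGo_canon : ∀ (fuel : Nat) (l out : List Char),
    (pvReduceGo fuel l).foldl pvCanonStep out = l.foldl pvCanonStep out := by
  intro fuel
  induction fuel with
  | zero => intro l out; rfl
  | succ n ih =>
    intro l out
    simp only [pvReduceGo]
    by_cases h : pvReduceStep l = l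
    · rw [if_pos h]
    · rw [if_neg h, ih, pvReduceStep_canon]

theorem pvReduceGo_fix : ∀ (fuel : Nat) (l : List Char), l.length < fuel →
    pvReduceStep (pvReduceGo fuel l) = pvReduceGo fuel l := by
  intro fuel
  induction fuel with
  | zero => intro l h; omega
  | succ n ih =>
    intro l h
    simp only [pvReduceGo]
    by_cases he : pvReduceStep l = l
    · rw [if_pos he, he]
    · rw [if_neg he]
      exact ih _ (by have := pvReduceStep_length_lt l he; omega)

theorem pvReduce_noAdj (l : List Char) : pvNoAdj (pvReduce l) := by
  have hfix : pvReduceStep (pvReduce l) = pvReduce l :=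
    pvReduceGo_fix _ l (by omega)
  rw [pvReduceStep_eq] at hfix
  obtain ⟨e1, e2, e3, e4⟩ := pvFourFix (pvReduce l) hfix
  exact pvNoAdj_of_four _
    (pvDelPair_fix_noAdjP '(' ')' _ _ (le_refl _) e1)
    (pvDelPair_fix_noAdjP '[' ']' _ _ (le_refl _) e2)
    (pvDelPair_fix_noAdjP '{' '}' _ _ (le_refl _) e3)
    (pvDelPair_fix_noAdjP '<' '>' _ _ (le_refl _) e4)

theorem pvReduce_eq_canon (l : List Char) : pvReduce l = (l.foldl pvCanonStep []).reverse := by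
  have h1 : (pvReduce l).foldl pvCanonStep [] = l.foldl pvCanonStep [] := by
    unfold pvReduce; rw [pvReduceGo_canon]
  have h2 : (pvReduce l).foldl pvCanonStep [] = (pvReduce l).reverse ++ [] := by
    apply pvNoAdj_foldl _ _ (pvReduce_noAdj l)
    cases pvReduce l <;> trivial
  rw [← h1, h2]
  simp

theorem pvStatus_ok_open (cs : List Char) : ∀ stack st : List Char,
    (∀ x ∈ stack, pvIsOpen x = true) → pvStatus stack cs = .ok st →
    ∀ x ∈ st, pvIsOpen x = true := by
  induction cs with
  | nil =>
    intro stack st hs h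
    simp only [pvStatus, PvLineStatus.ok.injEq] at h
    subst h; exact hs
  | cons c rest ih =>
    intro stack st hs h
    by_cases ho : c = '(' ∨ c = '[' ∨ c = '{' ∨ c = '<'
    · simp only [pvStatus, if_pos ho] at h
      refine ih _ _ ?_ h
      intro x hx
      rcases List.mem_cons.mp hx with hx | hx
      · subst hx; simp [pvIsOpen, ho]
      · exact hs x hx
    · by_cases hc : c = ')' ∨ c = ']' ∨ c = '}' ∨ c = '>'
      · rcases stack with _ | ⟨t, sk⟩
        · simp [pvStatus, ho, hc] at h
        · simp only [pvStatus, if_neg ho, if_pos hc] at h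
          by_cases hm : (t = '(' ∧ c = ')') ∨ (t = '[' ∧ c = ']') ∨ (t = '{' ∧ c = '}') ∨ (t = '<' ∧ c = '>')
          · rw [if_pos hm] at h
            exact ih _ _ (fun x hx => hs x (List.mem_cons_of_mem _ hx)) h
          · rw [if_neg hm] at h; exact absurd h (by simp)
      · simp only [pvStatus, if_neg ho, if_neg hc] at h
        exact absurd h (by simp)

theorem pvMatched_pairOf (t c : Char) (ht : pvIsOpen t = true) :
    ((t = '(' ∧ c = ')') ∨ (t = '[' ∧ c = ']') ∨ (t = '{' ∧ c = '}') ∨ (t = '<' ∧ c = '>'))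
    ↔ pvPairOf t = some c := by
  constructor
  · rintro (⟨rfl, rfl⟩ | ⟨rfl, rfl⟩ | ⟨rfl, rfl⟩ | ⟨rfl, rfl⟩) <;> rfl
  · intro h
    simp only [pvIsOpen, decide_eq_true_eq] at ht
    rcases ht with rfl | rfl | rfl | rfl <;>
      (simp only [pvPairOf, reduceIte] at h; injection h with h) <;> simp [h.symm]

theorem pvStatus_ok_canon (cs : List Char) : ∀ stack st : List Char,
    (∀ x ∈ stack, pvIsOpen x = true) → pvStatus stack cs = .ok st →
    cs.foldl pvCanonStep stack = st := by
  induction cs with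
  | nil =>
    intro stack st hs h
    simp only [pvStatus, PvLineStatus.ok.injEq] at h
    simpa using h
  | cons c rest ih =>
    intro stack st hs h
    by_cases ho : c = '(' ∨ c = '[' ∨ c = '{' ∨ c = '<'
    · simp only [pvStatus, if_pos ho] at h
      have hop : pvIsOpen c = true := by simp [pvIsOpen, ho]
      simp only [List.foldl_cons, pvCanonStep_push _ _ hop]
      refine ih _ _ ?_ h
      intro x hx
      rcases List.mem_cons.mp hx with hx | hx
      · subst hx; exact hop
      · exact hs x hx
    · by_cases hc : c = ')' ∨ c = ']' ∨ c = '}' ∨ c = '>'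
      · rcases stack with _ | ⟨t, sk⟩
        · simp [pvStatus, ho, hc] at h
        · simp only [pvStatus, if_neg ho, if_pos hc] at h
          by_cases hm : (t = '(' ∧ c = ')') ∨ (t = '[' ∧ c = ']') ∨ (t = '{' ∧ c = '}') ∨ (t = '<' ∧ c = '>')
          · rw [if_pos hm] at h
            have hp : pvPairOf t = some c :=
              (pvMatched_pairOf t c (hs t (by simp))).mp hm
            simp only [List.foldl_cons, pvCanonStep, if_pos hp]
            exact ih _ _ (fun x hx => hs x (List.mem_cons_of_mem _ hx)) h
          · rw [if_neg hm] at h; exact absurd h (by simp)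
      · simp only [pvStatus, if_neg ho, if_neg hc] at h
        exact absurd h (by simp)

def pvHasBot (out : List Char) (c : Char) : Prop :=
  ∃ X O, out = X ++ c :: O ∧ ∀ x ∈ O, pvIsOpen x = true

theorem pvPairOf_some_open (c ch : Char) (h : pvPairOf c = some ch) : pvIsOpen c = true := by
  unfold pvPairOf at h
  split_ifs at h <;> simp_all [pvIsOpen]

theorem pvHasBot_step (c : Char) (hc : pvIsOpen c = false) (out : List Char) (ch : Char)
    (h : pvHasBot out c) : pvHasBot (pvCanonStep out ch) c := by
  obtain ⟨X, O, rfl, hO⟩ := h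
  match X with
  | [] =>
    have hnp : pvPairOf c ≠ some ch := by
      intro hx
      rw [pvPairOf_some_open c ch hx] at hc
      exact Bool.noConfusion hc
    simp only [List.nil_append, pvCanonStep, if_neg hnp]
    exact ⟨[ch], O, rfl, hO⟩
  | x :: X' =>
    by_cases hp : pvPairOf x = some ch
    · simp only [List.cons_append, pvCanonStep, if_pos hp]
      exact ⟨X', O, rfl, hO⟩
    · simp only [List.cons_append, pvCanonStep, if_neg hp]
      exact ⟨ch :: x :: X', O, rfl, hO⟩

theorem pvHasBot_foldl (c : Char) (hc : pvIsOpen c = false) : ∀ (rest out : List Char),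
    pvHasBot out c → pvHasBot (rest.foldl pvCanonStep out) c := by
  intro rest
  induction rest with
  | nil => intro out h; exact h
  | cons ch t ih =>
    intro out h
    exact ih _ (pvHasBot_step c hc out ch h)

theorem pvStatus_bad_canon (cs : List Char) : ∀ (stack : List Char) (ch : Char),
    (∀ x ∈ stack, pvIsOpen x = true) → pvStatus stack cs = .bad ch →
    pvIsOpen ch = false ∧ pvHasBot (cs.foldl pvCanonStep stack) ch := by
  induction cs with
  | nil => intro stack ch _ h; exact absurd h (by simp [pvStatus])
  | cons c rest ih =>
    intro stack ch hs h
    by_cases ho : c = '(' ∨ c = '[' ∨ c = '{' ∨ c = '<'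
    · simp only [pvStatus, if_pos ho] at h
      have hop : pvIsOpen c = true := by simp [pvIsOpen, ho]
      simp only [List.foldl_cons, pvCanonStep_push _ _ hop]
      refine ih _ _ ?_ h
      intro x hx
      rcases List.mem_cons.mp hx with hx | hx
      · subst hx; exact hop
      · exact hs x hx
    · have hnopen : pvIsOpen c = false := by
        simp only [pvIsOpen, decide_eq_false_iff_not]; exact ho
      by_cases hc : c = ')' ∨ c = ']' ∨ c = '}' ∨ c = '>'
      · rcases stack with _ | ⟨t, sk⟩
        · simp [pvStatus, ho, hc] at h
        · simp only [pvStatus, if_neg ho, if_pos hc] at h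
          by_cases hm : (t = '(' ∧ c = ')') ∨ (t = '[' ∧ c = ']') ∨ (t = '{' ∧ c = '}') ∨ (t = '<' ∧ c = '>')
          · rw [if_pos hm] at h
            have hp : pvPairOf t = some c :=
              (pvMatched_pairOf t c (hs t (by simp))).mp hm
            simp only [List.foldl_cons, pvCanonStep, if_pos hp]
            exact ih _ _ (fun x hx => hs x (List.mem_cons_of_mem _ hx)) h
          · rw [if_neg hm] at h
            injection h with h
            subst h
            have hp : pvPairOf t ≠ some c := by
              intro hx
              exact hm ((pvMatched_pairOf t c (hs t (by simp))).mpr hx)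
            refine ⟨hnopen, ?_⟩
            simp only [List.foldl_cons, pvCanonStep, if_neg hp]
            exact pvHasBot_foldl c hnopen rest _ ⟨[], t :: sk, rfl, hs⟩
      · simp only [pvStatus, if_neg ho, if_neg hc] at h
        injection h with h
        subst h
        refine ⟨hnopen, ?_⟩
        rcases stack with _ | ⟨t, sk⟩
        · simp only [List.foldl_cons, pvCanonStep]
          exact pvHasBot_foldl c hnopen rest _ ⟨[], [], rfl, by simp⟩
        · have hp : pvPairOf t ≠ some c := by
            intro hx
            have := (pvMatched_pairOf t c (hs t (by simp))).mpr hx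
            rcases this with ⟨_, rfl⟩ | ⟨_, rfl⟩ | ⟨_, rfl⟩ | ⟨_, rfl⟩ <;> simp at hc
          simp only [List.foldl_cons, pvCanonStep, if_neg hp]
          exact pvHasBot_foldl c hnopen rest _ ⟨[], t :: sk, rfl, hs⟩

theorem pvIsIn_open (c : Char) : PySem.Chars.isIn [c] pvOpensB = pvIsOpen c := by
  have hiff : PySem.Chars.isIn [c] pvOpensB = true ↔ c ∈ pvOpensB := by
    rw [PySem.Chars.isIn_iff_infix]
    constructor
    · intro h
      exact List.singleton_sublist.mp h.sublist
    · intro h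
      obtain ⟨s, t, he⟩ := List.append_of_mem h
      exact ⟨s, t, by rw [he]; simp⟩
  have hmem : (c ∈ pvOpensB) ↔ (pvIsOpen c = true) := by
    simp [pvOpensB, pvIsOpen]
  cases h1 : PySem.Chars.isIn [c] pvOpensB <;> cases h2 : pvIsOpen c <;>
    first
      | rfl
      | (exfalso; rw [h1] at hiff; rw [h2] at hmem; simp_all)

theorem pvFirstNonOpen_allOpen (l : List Char) (h : ∀ x ∈ l, pvIsOpen x = true) :
    pvFirstNonOpen l = none := by
  induction l with
  | nil => rfl
  | cons c t ih =>
    simp only [pvFirstNonOpen, pvIsIn_open, h c (by simp), if_true]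
    exact ih (fun x hx => h x (List.mem_cons_of_mem _ hx))

theorem pvFirstNonOpen_bot (c : Char) (hc : pvIsOpen c = false) : ∀ (A B : List Char),
    (∀ x ∈ A, pvIsOpen x = true) → pvFirstNonOpen (A ++ c :: B) = some c := by
  intro A
  induction A with
  | nil =>
    intro B _
    simp [pvFirstNonOpen, pvIsIn_open, hc]
  | cons x A' ih =>
    intro B hA
    simp only [List.cons_append, pvFirstNonOpen, pvIsIn_open, hA x (by simp), if_true]
    exact ih B (fun y hy => hA y (List.mem_cons_of_mem _ hy))

def pvCloserOf (c : Char) : Char :=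
  if c = '(' then ')' else if c = '[' then ']' else if c = '{' then '}' else '>'

theorem pvScore_eq (st : List Char) : ∀ s : Int, (∀ x ∈ st, pvIsOpen x = true) →
    (st.map pvCloserOf).foldl (fun s ch => s * 5 + (PySem.Dict.get? pvAutoDictA [ch]).getD 0) s
    = st.foldl (fun s c => s * 5 + (PySem.Chars.find pvOpensB [c] + 1)) s := by
  induction st with
  | nil => intro s _; rfl
  | cons c rest ih =>
    intro s hop
    have hc : pvIsOpen c = true := hop c (by simp)
    have hrest : ∀ x ∈ rest, pvIsOpen x = true := fun x hx => hop x (List.mem_cons_of_mem _ hx)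
    simp only [pvIsOpen, decide_eq_true_eq] at hc
    rcases hc with rfl | rfl | rfl | rfl <;>
      (simp only [List.map_cons, List.foldl_cons]; rw [ih _ hrest]; congr 1)

theorem pvFindVal_ge_one (c : Char) (h : pvIsOpen c = true) :
    1 ≤ PySem.Chars.find pvOpensB [c] + 1 := by
  simp only [pvIsOpen, decide_eq_true_eq] at h
  rcases h with rfl | rfl | rfl | rfl <;> decide

theorem pvScoreB_pos (st : List Char) : ∀ s : Int, (∀ x ∈ st, pvIsOpen x = true) → 1 ≤ s →
    1 ≤ st.foldl (fun s c => s * 5 + (PySem.Chars.find pvOpensB [c] + 1)) s := by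
  induction st with
  | nil => intro s _ hs; exact hs
  | cons c rest ih =>
    intro s hop hs
    have hc : pvIsOpen c = true := hop c (by simp)
    have hrest : ∀ x ∈ rest, pvIsOpen x = true := fun x hx => hop x (List.mem_cons_of_mem _ hx)
    have hv := pvFindVal_ge_one c hc
    simp only [List.foldl_cons]
    exact ih _ hrest (by omega)

theorem pvScoreB_ne_zero (c : Char) (st : List Char)
    (hop : ∀ x ∈ c :: st, pvIsOpen x = true) :
    (c :: st).foldl (fun s c => s * 5 + (PySem.Chars.find pvOpensB [c] + 1)) 0 ≠ 0 := by
  have hc : pvIsOpen c = true := hop c (by simp)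
  have hrest : ∀ x ∈ st, pvIsOpen x = true := fun x hx => hop x (List.mem_cons_of_mem _ hx)
  have hv := pvFindVal_ge_one c hc
  have h1 : 1 ≤ (c :: st).foldl (fun s c => s * 5 + (PySem.Chars.find pvOpensB [c] + 1)) 0 := by
    simp only [List.foldl_cons]
    exact pvScoreB_pos st _ hrest (by omega)
  omega

theorem pvBuildAuto_eq (st : List Char) (hop : ∀ x ∈ st, pvIsOpen x = true) :
    pvBuildAuto st = st.map pvCloserOf := by
  suffices hgen : ∀ acc, st.foldl (fun acc ch =>
      if ch = '(' then acc ++ [')'] else if ch = '[' then acc ++ [']']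
      else if ch = '{' then acc ++ ['}'] else if ch = '<' then acc ++ ['>'] else acc) acc
      = acc ++ st.map pvCloserOf by
    simpa [pvBuildAuto] using hgen []
  induction st with
  | nil => simp
  | cons c rest ih =>
    intro acc
    have hc : pvIsOpen c = true := hop c (by simp)
    have hrest : ∀ x ∈ rest, pvIsOpen x = true := fun x hx => hop x (List.mem_cons_of_mem _ hx)
    simp only [pvIsOpen, decide_eq_true_eq] at hc
    rcases hc with rfl | rfl | rfl | rfl <;>
      simp [List.foldl_cons, ih hrest, pvCloserOf]

theorem pvGetIllegal_eq_status (cs : List Char) : ∀ stack : List Char,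
    pvGetIllegal stack cs =
      (match pvStatus stack cs with
       | .ok _ => some []
       | .bad c => some [c]
       | .err => none) := by
  induction cs with
  | nil => intro stack; simp [pvGetIllegal, pvStatus]
  | cons c rest ih =>
    intro stack
    by_cases ho : c = '(' ∨ c = '[' ∨ c = '{' ∨ c = '<'
    · simp [pvGetIllegal, pvStatus, ho, ih]
    · by_cases hc : c = ')' ∨ c = ']' ∨ c = '}' ∨ c = '>'
      · match stack with
        | [] => rcases hc with h|h|h|h <;> subst h <;> simp_all [pvGetIllegal, pvStatus]
        | t :: s =>
          rcases hc with h|h|h|h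
          · subst h; by_cases ht : t = '(' <;> simp_all [pvGetIllegal, pvStatus]
          · subst h; by_cases ht : t = '[' <;> simp_all [pvGetIllegal, pvStatus]
          · subst h; by_cases ht : t = '{' <;> simp_all [pvGetIllegal, pvStatus]
          · subst h; by_cases ht : t = '<' <;> simp_all [pvGetIllegal, pvStatus]
      · have h1 : ¬ c = ')' := fun h => hc (Or.inl h)
        have h2 : ¬ c = ']' := fun h => hc (Or.inr (Or.inl h))
        have h3 : ¬ c = '}' := fun h => hc (Or.inr (Or.inr (Or.inl h)))
        have h4 : ¬ c = '>' := fun h => hc (Or.inr (Or.inr (Or.inr h)))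
        simp [pvGetIllegal, pvStatus, ho, h1, h2, h3, h4]

theorem pvAutoComplete_eq_status (cs : List Char) : ∀ stack : List Char,
    pvAutoComplete stack cs =
      (match pvStatus stack cs with
       | .ok st => some (pvBuildAuto st)
       | .bad _ => some []
       | .err => none) := by
  induction cs with
  | nil => intro stack; simp [pvAutoComplete, pvStatus]
  | cons c rest ih =>
    intro stack
    by_cases ho : c = '(' ∨ c = '[' ∨ c = '{' ∨ c = '<'
    · simp [pvAutoComplete, pvStatus, ho, ih]
    · by_cases hc : c = ')' ∨ c = ']' ∨ c = '}' ∨ c = '>'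
      · match stack with
        | [] => rcases hc with h|h|h|h <;> subst h <;> simp_all [pvAutoComplete, pvStatus]
        | t :: s =>
          rcases hc with h|h|h|h
          · subst h; by_cases ht : t = '(' <;> simp_all [pvAutoComplete, pvStatus]
          · subst h; by_cases ht : t = '[' <;> simp_all [pvAutoComplete, pvStatus]
          · subst h; by_cases ht : t = '{' <;> simp_all [pvAutoComplete, pvStatus]
          · subst h; by_cases ht : t = '<' <;> simp_all [pvAutoComplete, pvStatus]
      · have h1 : ¬ c = ')' := fun h => hc (Or.inl h)
        have h2 : ¬ c = ']' := fun h => hc (Or.inr (Or.inl h))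
        have h3 : ¬ c = '}' := fun h => hc (Or.inr (Or.inr (Or.inl h)))
        have h4 : ¬ c = '>' := fun h => hc (Or.inr (Or.inr (Or.inr h)))
        simp [pvAutoComplete, pvStatus, ho, h1, h2, h3, h4]

theorem pvReduce_ok (l st : List Char) (hst : pvStatus [] l = .ok st) :
    pvReduce l = st.reverse := by
  rw [pvReduce_eq_canon, pvStatus_ok_canon l [] st (by simp) hst]

theorem pvLine1_eq (l : List Char) (hs : pvSafe1 (pvStatus [] l) = true) :
    (PySem.Dict.get? pvIllegalDictA ((pvGetIllegal [] l).getD [])).getD 0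
    = (PySem.Dict.get? pvIllegalDictB
        (match pvFirstNonOpen (pvReduce l) with | some c => [c] | none => [])).getD 0 := by
  rw [pvGetIllegal_eq_status]
  cases hst : pvStatus [] l with
  | err => rw [hst] at hs; exact absurd hs (by simp [pvSafe1])
  | ok st =>
    have hop := pvStatus_ok_open l [] st (by simp) hst
    rw [pvReduce_ok l st hst]
    rw [pvFirstNonOpen_allOpen st.reverse (fun x hx => hop x (List.mem_reverse.mp hx))]
    rfl
  | bad c =>
    rw [hst] at hs
    obtain ⟨hno, X, O, heq, hO⟩ := pvStatus_bad_canon l [] c (by simp) hst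
    have hred : pvReduce l = O.reverse ++ c :: X.reverse := by
      rw [pvReduce_eq_canon, heq]
      simp
    rw [hred, pvFirstNonOpen_bot c hno O.reverse X.reverse
      (fun x hx => hO x (List.mem_reverse.mp hx))]
    simp only [pvSafe1, decide_eq_true_eq] at hs
    rcases hs with rfl | rfl | rfl | rfl <;> rfl

theorem pvLine2_eq (l : List Char) (hne : pvStatus [] l ≠ .err) (acc : List Int) :
    (if ((pvAutoComplete [] l).getD []).foldl
          (fun s ch => s * 5 + (PySem.Dict.get? pvAutoDictA [ch]).getD 0) 0 ≠ 0
     then acc ++ [((pvAutoComplete [] l).getD []).foldl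
          (fun s ch => s * 5 + (PySem.Dict.get? pvAutoDictA [ch]).getD 0) 0]
     else acc)
    = (if pvReduce l ≠ [] ∧ (pvReduce l).all (fun c => PySem.Chars.isIn [c] pvOpensB) then
         acc ++ [(pvReduce l).reverse.foldl (fun s c => s * 5 + (PySem.Chars.find pvOpensB [c] + 1)) 0]
       else acc) := by
  rw [pvAutoComplete_eq_status]
  cases hst : pvStatus [] l with
  | err => exact absurd hst hne
  | ok st =>
    have hop := pvStatus_ok_open l [] st (by simp) hst
    have hred := pvReduce_ok l st hst
    rw [hred]
    simp only [Option.getD_some, List.reverse_reverse]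
    rw [pvBuildAuto_eq st hop, pvScore_eq st 0 hop]
    cases st with
    | nil => simp
    | cons c rest =>
      rw [if_pos (pvScoreB_ne_zero c rest hop)]
      rw [if_pos ⟨by simp, by
        simp only [List.all_eq_true]
        intro x hx
        rw [pvIsIn_open]
        exact hop x (List.mem_reverse.mp hx)⟩]
  | bad c =>
    obtain ⟨hno, X, O, heq, hO⟩ := pvStatus_bad_canon l [] c (by simp) hst
    have hred : pvReduce l = O.reverse ++ c :: X.reverse := by
      rw [pvReduce_eq_canon, heq]; simp
    simp only [Option.getD_some, List.foldl_nil]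
    rw [if_neg (by simp)]
    rw [if_neg (by
      rintro ⟨-, hall⟩
      rw [hred] at hall
      simp only [List.all_eq_true] at hall
      have := hall c (by simp)
      rw [pvIsIn_open] at this
      rw [hno] at this
      exact Bool.noConfusion this)]

theorem pvCode1_fold (data : List String) : ∀ (a : Int) (l : List Int),
    (∀ line ∈ data, pvSafe1 (pvStatus [] line.toList) = true) →
    (data.foldl (fun (acc : Int × List Int) line =>
        (acc.1 + (PySem.Dict.get? pvIllegalDictA ((pvGetIllegal [] line.toList).getD [])).getD 0,
         acc.2)) (a, l)).1
    = data.foldl (fun total line =>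
        let r := pvReduce line.toList
        total + (PySem.Dict.get? pvIllegalDictB
          (match pvFirstNonOpen r with | some c => [c] | none => [])).getD 0) a := by
  induction data with
  | nil => intro a l _; rfl
  | cons line rest ih =>
    intro a l hsafe
    have h1 := pvLine1_eq line.toList (hsafe line (by simp))
    simp only [List.foldl_cons]
    rw [ih _ _ (fun x hx => hsafe x (List.mem_cons_of_mem _ hx))]
    rw [h1]

theorem pvCode2_fold (data : List String) : ∀ (a : Int) (l : List Int),
    (∀ line ∈ data, pvStatus [] line.toList ≠ .err) →
    (data.foldl (fun (acc : Int × List Int) line =>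
        let auto := (pvAutoComplete [] line.toList).getD []
        let score := auto.foldl (fun s ch => s * 5 + (PySem.Dict.get? pvAutoDictA [ch]).getD 0) 0
        if score ≠ 0 then (score, acc.2 ++ [score]) else (score, acc.2)) (a, l)).2
    = data.foldl (fun (acc : List Int) line =>
        let r := pvReduce line.toList
        if r ≠ [] ∧ r.all (fun c => PySem.Chars.isIn [c] pvOpensB) then
          acc ++ [r.reverse.foldl (fun s c => s * 5 + (PySem.Chars.find pvOpensB [c] + 1)) 0]
        else acc) l := by
  induction data with
  | nil => intro a l _; rfl
  | cons line rest ih =>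
    intro a l hsafe
    have h2 := pvLine2_eq line.toList (hsafe line (by simp)) l
    have htl : ∀ x ∈ rest, pvStatus [] x.toList ≠ PvLineStatus.err :=
      fun x hx => hsafe x (List.mem_cons_of_mem _ hx)
    simp only [List.foldl_cons]
    by_cases hsc : (((pvAutoComplete [] line.toList).getD []).foldl
        (fun s ch => s * 5 + (PySem.Dict.get? pvAutoDictA [ch]).getD 0) 0) ≠ 0
    · rw [if_pos hsc] at h2
      rw [if_pos hsc, ih _ _ htl, h2]
    · rw [if_neg hsc] at h2
      rw [if_neg hsc, ih _ _ htl]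
      conv_lhs => rw [h2]

theorem pvFold_id (data : List String) (p : Int × List Int) :
    data.foldl (fun acc (_ : String) => acc) p = p := by
  induction data with
  | nil => rfl
  | cons line rest ih => simp [ih]

theorem pvTruncdiv_two (n : Nat) :
    PySem.Int.truncdiv (n : Int) 2 = PySem.Int.floordiv (n : Int) 2 := by
  simp [PySem.Int.truncdiv, PySem.Int.floordiv, Int.fdiv_eq_ediv]

-- ===== VERDICT (by name: the statement is the Claim_ definition above) =====
theorem calculate_syntax_score_spec : Claim_equal_calculate_syntax_score := by
  intro data code _ hpre
  obtain ⟨hp1, hp2⟩ := hpre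
  unfold Spec_calculate_syntax_score
  by_cases hc1 : code = 1
  · subst hc1
    have e12 : ((1 : Int) = 2) = False := by norm_num
    unfold calculate_syntax_score calculate_syntax_score_alt
    simp only [e12, ite_true, ite_false]
    exact pvCode1_fold data 0 [] (hp1 rfl)
  · by_cases hc2 : code = 2
    · subst hc2
      obtain ⟨hne, _⟩ := hp2 rfl
      have e21 : ((2 : Int) = 1) = False := by norm_num
      unfold calculate_syntax_score calculate_syntax_score_alt
      simp only [e21, ite_true, ite_false]
      rw [pvCode2_fold data 0 [] hne, pvTruncdiv_two]
    · unfold calculate_syntax_score calculate_syntax_score_alt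
      simp only [if_neg hc1, if_neg hc2]
      rw [pvFold_id]
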